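-- pv_equiv track=rewrite | github.com/thiagoc01/trab-problema-n-rainhas | algoritmoGeneticoBinario.py | constroiIntervalosSelecao
-- ===== SOURCE A (Python) =====
-- def constroiIntervalosSelecao(roleta):  # Apenas cria uma lista de intervalos, parecidos com construção de frequências em Estatística
--     limiteInferior = roleta[0]
--     limiteSuperior = roleta[0]
--
--     intervalos = []
--
--     # Coloca o primeiro intervalo, que é 0 e o primeiro valor em roleta
--
--     intervalos.append([0, roleta[0]])
--
--     # Os demais são o teto do último intervalo e esse valor acrescido do atual a ser verificado da roleta
--
--     for avaliacao in roleta[1 : ]: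
--         limiteSuperior = limiteInferior + avaliacao
--
--         intervalos.append([limiteInferior, limiteSuperior])
--
--         limiteInferior = limiteSuperior
--
--     return intervalos
-- ===== SOURCE B (Python) =====
-- def constroiIntervalosSelecao(roleta):
--     # Balanced divide-and-conquer: solve each half independently (intervals starting
--     # at 0), then translate the right half's intervals by the left half's total.
--     def resolve(seg):
--         # returns (sum of seg, selection intervals of seg starting at 0)
--         if not seg:
--             return 0, []
--         if len(seg) == 1:
--             return seg[0], [[0, seg[0]]]
--         meio = len(seg) // 2
--         somaEsq, esq = resolve(seg[:meio])
--         somaDir, dire = resolve(seg[meio:])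
--         return somaEsq + somaDir, esq + [[x + somaEsq for x in intervalo] for intervalo in dire]
--     return resolve(roleta)[1]
-- ===== Notes on version B (the rewrite author's own statement) =====
-- stated objective: alternative
-- what changed: B is a balanced divide-and-conquer: it recursively builds the interval tables of the two halves independently (each starting at 0) and merges them by translating every interval of the right half by the left half's total, instead of A's single forward loop threading running lower/upper bounds.
import Mathlib
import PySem

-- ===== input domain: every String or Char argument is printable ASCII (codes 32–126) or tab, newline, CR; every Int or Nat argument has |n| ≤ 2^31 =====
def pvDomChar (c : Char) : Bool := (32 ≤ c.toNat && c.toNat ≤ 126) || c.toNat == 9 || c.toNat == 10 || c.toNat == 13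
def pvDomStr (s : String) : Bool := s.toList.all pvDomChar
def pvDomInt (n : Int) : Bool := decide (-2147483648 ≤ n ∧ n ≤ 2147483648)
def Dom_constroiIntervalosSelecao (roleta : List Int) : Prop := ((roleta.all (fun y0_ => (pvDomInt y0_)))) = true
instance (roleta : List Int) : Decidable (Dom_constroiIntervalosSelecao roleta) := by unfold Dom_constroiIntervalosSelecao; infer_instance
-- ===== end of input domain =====

-- B replaces A's fused running-bound loop with a balanced divide-and-conquer: solve each
-- half (intervals starting at 0), then translate the right half by the left sum (alternative).


-- ===== PORT A =====
-- the for-loop over roleta[1:], threading (limiteInferior, intervalos)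
def pvALoop (limInf : Int) (intervalos : List (List Int)) : List Int → List (List Int)
  | [] => intervalos
  | r :: rest => pvALoop (limInf + r) (intervalos ++ [[limInf, limInf + r]]) rest

def constroiIntervalosSelecao (roleta : List Int) : List (List Int) :=
  match roleta with
  | [] => []   -- roleta[0] raises IndexError in Python; excluded by Pre_
  | h :: t => pvALoop h [[0, h]] t

-- ===== PORT B =====
-- resolve(seg): (sum of seg, selection intervals of seg starting at 0)
def pvResolve : List Int → Int × List (List Int)
  | [] => (0, [])
  | [x] => (x, [[0, x]])
  | a :: b :: t =>
    let seg := a :: b :: t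
    let meio := seg.length / 2
    let esqR := pvResolve (seg.take meio)
    let dirR := pvResolve (seg.drop meio)
    (esqR.1 + dirR.1,
      esqR.2 ++ dirR.2.map (fun intervalo => intervalo.map (fun x => x + esqR.1)))
termination_by seg => seg.length
decreasing_by
  · simp only [List.length_take, List.length_cons]; omega
  · simp only [List.length_drop, List.length_cons]; omega

def constroiIntervalosSelecao_alt (roleta : List Int) : List (List Int) :=
  (pvResolve roleta).2

-- ===== PRECONDITION & SPEC =====
-- A raises IndexError on the empty list (roleta[0]); excluded.
def Pre_constroiIntervalosSelecao (roleta : List Int) : Prop := roleta ≠ []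
instance (roleta : List Int) : Decidable (Pre_constroiIntervalosSelecao roleta) := by unfold Pre_constroiIntervalosSelecao; infer_instance
def pvWitness_constroiIntervalosSelecao : List Int := [3, 1, 4]

def Spec_constroiIntervalosSelecao (roleta : List Int) (out : List (List Int)) : Prop := out = constroiIntervalosSelecao_alt roleta
instance (roleta : List Int) (out : List (List Int)) : Decidable (Spec_constroiIntervalosSelecao roleta out) := by unfold Spec_constroiIntervalosSelecao; infer_instance

-- ===== CLAIM (what is proved, stated in full; the proofs are below) =====
def Claim_equal_constroiIntervalosSelecao : Prop := ∀ (roleta : List Int), Dom_constroiIntervalosSelecao roleta → Pre_constroiIntervalosSelecao roleta → Spec_constroiIntervalosSelecao roleta (constroiIntervalosSelecao roleta)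

-- ===== LEMMAS AND PROOFS =====

-- the accumulator of A's loop is a pure prefix of the result
theorem pvALoop_acc (t : List Int) (lim : Int) (acc : List (List Int)) :
    pvALoop lim acc t = acc ++ pvALoop lim [] t := by
  induction t generalizing lim acc with
  | nil => simp [pvALoop]
  | cons r rest ih =>
    simp only [pvALoop]
    rw [ih, ih (lim + r) ([] ++ [[lim, lim + r]])]
    simp

-- shifting twice is shifting by the sum
theorem pvShiftShift (L : List (List Int)) (a b : Int) :
    (L.map (fun iv => iv.map (fun x => x + a))).map (fun iv => iv.map (fun x => x + b))
      = L.map (fun iv => iv.map (fun x => x + (a + b))) := by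
  rw [List.map_map]
  apply List.map_congr_left
  intro iv _
  simp only [Function.comp, List.map_map]
  apply List.map_congr_left
  intro x _
  simp only [Function.comp]
  ring

-- A's loop started at lim is the loop started at 0, translated by lim
theorem pvALoop_shift (t : List Int) (lim : Int) :
    pvALoop lim [] t = (pvALoop 0 [] t).map (fun iv => iv.map (fun x => x + lim)) := by
  induction t generalizing lim with
  | nil => simp [pvALoop]
  | cons r rest ih =>
    simp only [pvALoop, List.nil_append]
    rw [pvALoop_acc, pvALoop_acc rest (0 + r)]
    rw [ih (lim + r), ih (0 + r), List.map_append, pvShiftShift]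
    congr 1
    · simp only [List.map_cons, List.map_nil, Int.zero_add]
      rw [Int.add_comm r lim]
    · apply List.map_congr_left
      intro iv _
      apply List.map_congr_left
      intro x _
      ring

-- A's loop over a concatenation splits at the sum of the first part
theorem pvALoop_append (u v : List Int) (lim : Int) (acc : List (List Int)) :
    pvALoop lim acc (u ++ v) = pvALoop (lim + u.sum) (pvALoop lim acc u) v := by
  induction u generalizing lim acc with
  | nil => simp [pvALoop]
  | cons r u' ih =>
    simp only [List.cons_append, pvALoop]
    rw [ih, List.sum_cons, ← Int.add_assoc]

-- A's loop started at lim over a nonempty list is A's result there, translated by lim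
theorem pvALoop_as_A (k : Int) (w : List Int) (lim : Int) :
    pvALoop lim [] (k :: w)
      = (constroiIntervalosSelecao (k :: w)).map (fun iv => iv.map (fun x => x + lim)) := by
  show _ = (pvALoop k [[0, k]] w).map _
  rw [pvALoop_acc w k [[0, k]]]
  simp only [pvALoop, List.nil_append]
  rw [pvALoop_acc, pvALoop_shift w (lim + k), List.map_append, pvALoop_shift w k, pvShiftShift]
  congr 1
  · simp only [List.map_cons, List.map_nil, Int.zero_add]
    rw [Int.add_comm k lim]
  · apply List.map_congr_left
    intro iv _
    apply List.map_congr_left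
    intro x _
    ring

-- A on a concatenation of nonempty parts: left result, then right result translated by left sum
theorem pvA_append (xs ys : List Int) (hx : xs ≠ []) (hy : ys ≠ []) :
    constroiIntervalosSelecao (xs ++ ys)
      = constroiIntervalosSelecao xs
        ++ (constroiIntervalosSelecao ys).map (fun iv => iv.map (fun x => x + xs.sum)) := by
  obtain ⟨h, t, rfl⟩ : ∃ h t, xs = h :: t := by cases xs with
    | nil => exact absurd rfl hx
    | cons h t => exact ⟨h, t, rfl⟩
  obtain ⟨k, w, rfl⟩ : ∃ k w, ys = k :: w := by cases ys with
    | nil => exact absurd rfl hy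
    | cons k w => exact ⟨k, w, rfl⟩
  show pvALoop h [[0, h]] (t ++ k :: w) = pvALoop h [[0, h]] t ++ _
  rw [pvALoop_append, pvALoop_acc, pvALoop_as_A k w (h + t.sum), List.sum_cons]

-- pvResolve computes (sum, A's interval table) on every nonempty list
theorem pvResolve_eq : ∀ (n : Nat) (seg : List Int), seg.length ≤ n → seg ≠ [] →
    pvResolve seg = (seg.sum, constroiIntervalosSelecao seg) := by
  intro n
  induction n with
  | zero => intro seg hlen hne; cases seg with
    | nil => exact absurd rfl hne
    | cons a t => simp at hlen
  | succ m ih =>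
    intro seg hlen hne
    match seg with
    | [a] => simp [pvResolve, constroiIntervalosSelecao, pvALoop]
    | a :: b :: t =>
      rw [pvResolve]
      have hlen2 : (a :: b :: t).length = t.length + 2 := by simp
      have hmeio : (a :: b :: t).length / 2 = (t.length + 2) / 2 := by rw [hlen2]
      have htake_len : ((a :: b :: t).take ((a :: b :: t).length / 2)).length
          = (t.length + 2) / 2 := by
        simp only [List.length_take, hlen2]; omega
      have hdrop_len : ((a :: b :: t).drop ((a :: b :: t).length / 2)).length
          = t.length + 2 - (t.length + 2) / 2 := by
        simp only [List.length_drop, hlen2]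
      have htake_ne : (a :: b :: t).take ((a :: b :: t).length / 2) ≠ [] := by
        intro h; have := congrArg List.length h; rw [htake_len] at this
        simp only [List.length_nil] at this; omega
      have hdrop_ne : (a :: b :: t).drop ((a :: b :: t).length / 2) ≠ [] := by
        intro h; have := congrArg List.length h; rw [hdrop_len] at this
        simp only [List.length_nil] at this; omega
      rw [ih _ (by rw [htake_len]; omega) htake_ne,
          ih _ (by rw [hdrop_len]; simp only [hlen2] at hlen; omega) hdrop_ne]
      have hsplit := List.take_append_drop ((a :: b :: t).length / 2) (a :: b :: t)
      simp only [Prod.mk.injEq]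
      refine ⟨?_, ?_⟩
      · conv_rhs => rw [← hsplit]
        rw [List.sum_append]
      · conv_rhs => rw [← hsplit]
        rw [pvA_append _ _ htake_ne hdrop_ne]

-- ===== VERDICT (by name: the statement is the Claim_ definition above) =====
theorem constroiIntervalosSelecao_spec : Claim_equal_constroiIntervalosSelecao := by
  intro roleta _ hpre
  unfold Spec_constroiIntervalosSelecao constroiIntervalosSelecao_alt
  rw [pvResolve_eq roleta.length roleta le_rfl hpre]
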